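-- pv_equiv track=rewrite | github.com/joho54/jungle-backjoon | BOJ2309.py | find_dwarfs
-- ===== SOURCE A (Python) =====
-- def find_dwarfs(dwarfs):
--     sum_val = sum(dwarfs)
--     for i in range(len(dwarfs)):
--         dwarf1 = dwarfs[i]
--         for j in range(i+1, len(dwarfs)):
--             dwarf2 = dwarfs[j]
--             if sum_val - dwarf1 - dwarf2 == 100:
--                 return sorted([dwarf for dwarf in dwarfs if dwarf != dwarf1 and dwarf != dwarf2])
-- ===== SOURCE B (Python) =====
-- def find_dwarfs(dwarfs):
--     need = sum(dwarfs) - 100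
--     remaining = {}
--     for d in dwarfs:
--         remaining[d] = remaining.get(d, 0) + 1
--     for d in dwarfs:
--         remaining[d] = remaining.get(d, 0) - 1
--         partner = need - d
--         if remaining.get(partner, 0) > 0:
--             return sorted(x for x in dwarfs if x != d and x != partner)
--     return None
-- ===== Notes on version B (the rewrite author's own statement) =====
-- stated objective: faster
-- what changed: Replaces A's O(n^2) nested index scan over all pairs by a single left-to-right pass that looks up the complement partner (sum-100-d) in a hash-map count of the remaining suffix.
import Mathlib
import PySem

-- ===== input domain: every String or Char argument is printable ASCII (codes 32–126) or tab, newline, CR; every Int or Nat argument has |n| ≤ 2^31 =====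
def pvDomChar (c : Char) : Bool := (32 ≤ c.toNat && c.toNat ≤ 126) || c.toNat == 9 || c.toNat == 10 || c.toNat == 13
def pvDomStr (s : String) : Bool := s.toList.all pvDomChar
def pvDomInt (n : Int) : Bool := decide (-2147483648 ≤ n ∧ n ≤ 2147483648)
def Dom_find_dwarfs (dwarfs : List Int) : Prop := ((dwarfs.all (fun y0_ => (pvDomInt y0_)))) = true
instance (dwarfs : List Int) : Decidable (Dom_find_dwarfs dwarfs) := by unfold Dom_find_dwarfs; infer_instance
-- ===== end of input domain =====

-- B replaces A's O(n^2) nested index scan by a one-pass hash-count lookup of the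
-- complement partner (objective: faster, asymptotic O(n^2) -> O(n) in Python).


-- ===== PORT A =====
-- inner loop: 'for j in range(i+1, len(dwarfs)): …'
def pvAInner (dwarfs : List Int) (sum_val dwarf1 : Int) : List Int → Option (List Int)
  | [] => none
  | j :: js =>
    match PySem.List.pyGet? dwarfs j with
    | none => none   -- unreachable: j comes from range(i+1, len(dwarfs))
    | some dwarf2 =>
      if sum_val - dwarf1 - dwarf2 = 100 then
        some (PySem.List.sorted (dwarfs.filter (fun dwarf => dwarf != dwarf1 && dwarf != dwarf2))
                (fun x => x) false)
      else pvAInner dwarfs sum_val dwarf1 js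

-- outer loop: 'for i in range(len(dwarfs)): …'
def pvAOuter (dwarfs : List Int) (sum_val : Int) : List Int → Option (List Int)
  | [] => none
  | i :: is =>
    match PySem.List.pyGet? dwarfs i with
    | none => none   -- unreachable: i comes from range(len(dwarfs))
    | some dwarf1 =>
      match pvAInner dwarfs sum_val dwarf1 (PySem.List.pyRange (i+1) dwarfs.length 1) with
      | some r => some r
      | none => pvAOuter dwarfs sum_val is

def find_dwarfs (dwarfs : List Int) : Option (List Int) :=
  pvAOuter dwarfs dwarfs.sum (PySem.List.pyRange 0 dwarfs.length 1)

-- ===== PORT B =====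
-- second loop of Source B: decrement own count, look up the complement partner
def pvBGo (dwarfs : List Int) (need : Int) :
    PySem.Dict Int Int → List Int → Option (List Int)
  | _, [] => none
  | remaining, d :: rest =>
    let remaining' := remaining.insert d (remaining.getD d 0 - 1)
    let partner := need - d
    if remaining'.getD partner 0 > 0 then
      some (PySem.List.sorted (dwarfs.filter (fun x => x != d && x != partner)) (fun x => x) false)
    else pvBGo dwarfs need remaining' rest

def find_dwarfs_alt (dwarfs : List Int) : Option (List Int) :=
  let need := dwarfs.sum - 100
  let remaining := dwarfs.foldl (fun d x => d.insert x (d.getD x 0 + 1)) PySem.Dict.empty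
  pvBGo dwarfs need remaining dwarfs

-- ===== PRECONDITION & SPEC =====
def Spec_find_dwarfs (dwarfs : List Int) (out : Option (List Int)) : Prop := out = find_dwarfs_alt dwarfs
instance (dwarfs : List Int) (out : Option (List Int)) : Decidable (Spec_find_dwarfs dwarfs out) := by unfold Spec_find_dwarfs; infer_instance

-- ===== CLAIM =====
def Claim_equal_find_dwarfs : Prop := ∀ (dwarfs : List Int), Dom_find_dwarfs dwarfs → Spec_find_dwarfs dwarfs (find_dwarfs dwarfs)

-- ===== LEMMAS AND PROOFS =====
-- proof-only reference: scan the list left to right; fire on the first element whose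
-- complement partner occurs later in the list
def pvRef (dwarfs : List Int) (s : Int) : List Int → Option (List Int)
  | [] => none
  | d :: rest =>
    if s - d - 100 ∈ rest then
      some (PySem.List.sorted (dwarfs.filter (fun x => x != d && x != (s - d - 100))) (fun x => x) false)
    else pvRef dwarfs s rest

theorem pvAInner_spec (dwarfs : List Int) (s d1 : Int) (k : Nat) (hk : k ≤ dwarfs.length) :
    pvAInner dwarfs s d1 (PySem.List.pyRange (k : Int) (dwarfs.length : Int) 1) =
      (if s - d1 - 100 ∈ dwarfs.drop k then
        some (PySem.List.sorted (dwarfs.filter (fun x => x != d1 && x != (s - d1 - 100)))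
          (fun x => x) false)
      else none) := by
  induction hd : dwarfs.length - k generalizing k with
  | zero =>
    have hk' : k = dwarfs.length := by omega
    subst hk'
    rw [PySem.List.pyRange_one_eq_nil (by omega)]
    simp [pvAInner]
  | succ m ih =>
    have hlt : k < dwarfs.length := by omega
    rw [PySem.List.pyRange_one_cons (by exact_mod_cast hlt)]
    have hget : PySem.List.pyGet? dwarfs (k : Int) = some dwarfs[k] :=
      PySem.List.pyGet?_ofNat dwarfs k hlt
    have hdrop : dwarfs.drop k = dwarfs[k] :: dwarfs.drop (k + 1) :=
      List.drop_eq_getElem_cons hlt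
    rw [pvAInner, hget]
    dsimp only
    have hcast : (k : Int) + 1 = ((k + 1 : Nat) : Int) := by push_cast; ring
    by_cases hc : s - d1 - dwarfs[k] = 100
    · have ht : dwarfs[k] = s - d1 - 100 := by omega
      rw [if_pos hc, hdrop, ht]
      simp
    · rw [if_neg hc, hcast, ih (k + 1) (by omega) (by omega)]
      have hne : s - d1 - 100 ≠ dwarfs[k] := by omega
      have hmem : (s - d1 - 100 ∈ dwarfs.drop k) ↔ (s - d1 - 100 ∈ dwarfs.drop (k + 1)) := by
        rw [hdrop, List.mem_cons]
        exact ⟨fun h => h.resolve_left hne, Or.inr⟩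
      simp only [hmem]

theorem pvAOuter_spec (dwarfs : List Int) (s : Int) (k : Nat) (hk : k ≤ dwarfs.length) :
    pvAOuter dwarfs s (PySem.List.pyRange (k : Int) (dwarfs.length : Int) 1) =
      pvRef dwarfs s (dwarfs.drop k) := by
  induction hd : dwarfs.length - k generalizing k with
  | zero =>
    have hk' : k = dwarfs.length := by omega
    subst hk'
    rw [PySem.List.pyRange_one_eq_nil (by omega)]
    simp [pvAOuter, pvRef]
  | succ m ih =>
    have hlt : k < dwarfs.length := by omega
    rw [PySem.List.pyRange_one_cons (by exact_mod_cast hlt)]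
    have hget : PySem.List.pyGet? dwarfs (k : Int) = some dwarfs[k] :=
      PySem.List.pyGet?_ofNat dwarfs k hlt
    have hdrop : dwarfs.drop k = dwarfs[k] :: dwarfs.drop (k + 1) :=
      List.drop_eq_getElem_cons hlt
    have hcast : (k : Int) + 1 = ((k + 1 : Nat) : Int) := by push_cast; ring
    rw [pvAOuter, hget]
    dsimp only
    rw [hcast, pvAInner_spec dwarfs s dwarfs[k] (k + 1) (by omega), hdrop,
      pvRef]
    by_cases hm : s - dwarfs[k] - 100 ∈ dwarfs.drop (k + 1)
    · rw [if_pos hm, if_pos hm]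
    · rw [if_neg hm, if_neg hm, ih (k + 1) (by omega) (by omega)]

theorem pvBGo_spec (dwarfs : List Int) (s : Int) (suffix : List Int)
    (remaining : PySem.Dict Int Int)
    (hinv : ∀ v, remaining.getD v 0 = suffix.count v) :
    pvBGo dwarfs (s - 100) remaining suffix = pvRef dwarfs s suffix := by
  induction suffix generalizing remaining with
  | nil => simp [pvBGo, pvRef]
  | cons d rest ih =>
    rw [pvBGo, pvRef]
    have hinv' : ∀ v, (remaining.insert d (remaining.getD d 0 - 1)).getD v 0 = rest.count v := by
      intro v
      rw [PySem.Dict.getD_insert]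
      by_cases hv : v = d
      · subst hv; rw [if_pos rfl, hinv v]; simp
      · rw [if_neg hv, hinv v, List.count_cons]
        simp [Ne.symm hv]
    have hpart : s - 100 - d = s - d - 100 := by ring
    by_cases hm : s - d - 100 ∈ rest
    · have : (remaining.insert d (remaining.getD d 0 - 1)).getD (s - 100 - d) 0 > 0 := by
        rw [hinv', hpart]
        exact_mod_cast List.count_pos_iff.mpr hm
      simp only [hpart] at this ⊢
      rw [if_pos hm, if_pos this]
    · have : ¬ (remaining.insert d (remaining.getD d 0 - 1)).getD (s - 100 - d) 0 > 0 := by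
        rw [hinv', hpart]
        simp [List.count_eq_zero_of_not_mem hm]
      simp only [hpart] at this ⊢
      rw [if_neg hm, if_neg this]
      exact ih _ hinv'

-- ===== VERDICT =====
theorem find_dwarfs_spec : Claim_equal_find_dwarfs := by
  intro dwarfs _
  unfold Spec_find_dwarfs find_dwarfs find_dwarfs_alt
  have hA : pvAOuter dwarfs dwarfs.sum (PySem.List.pyRange 0 (dwarfs.length : Int) 1) =
      pvRef dwarfs dwarfs.sum dwarfs := by
    have := pvAOuter_spec dwarfs dwarfs.sum 0 (by omega)
    simpa using this
  have hB : pvBGo dwarfs (dwarfs.sum - 100)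
      (dwarfs.foldl (fun d x => d.insert x (d.getD x 0 + 1)) PySem.Dict.empty) dwarfs =
      pvRef dwarfs dwarfs.sum dwarfs := by
    apply pvBGo_spec
    intro v
    rw [PySem.Dict.getD_foldl_insert_add_one, PySem.Dict.getD_empty]
    simp
  rw [hA, hB]
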